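-- pv_equiv track=rewrite | github.com/petetomasik/advent-of-code-2018 | day2/part2.py | get_matching_boxes
-- ===== SOURCE A (Python) =====
-- def get_matching_boxes(inputs):
--     boxes = {}
--     for box_id in inputs:
--         boxes[box_id] = {}
--         for box_id2 in inputs:
--             diff = 0
--             if len(box_id) == len(box_id2):
--                 for i in range(0,len(box_id)):
--                     if box_id[i]!=box_id2[i]:
--                         diff+=1
--                 if diff == 1:
--                     for i in range(0,len(box_id)):
--                         if box_id[i]!=box_id2[i]:
--                             common_letters = box_id[:i] + box_id[i+1:]
--                             return common_letters
-- ===== SOURCE B (Python) =====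
-- def get_matching_boxes(inputs):
--     # Hash each id with one position deleted; a bucket collision between two
--     # distinct ids is exactly a pair differing in that single position.
--     buckets = {}
--     for idx, s in enumerate(inputs):
--         for p in range(len(s)):
--             buckets.setdefault((p, s[:p] + s[p+1:]), []).append(idx)
--     for idx, s in enumerate(inputs):
--         cands = [(j, p)
--                  for p in range(len(s))
--                  for j in buckets[(p, s[:p] + s[p+1:])]
--                  if j != idx and inputs[j] != s]
--         if cands:
--             j, p = min(cands)
--             return s[:p] + s[p+1:]
--     return None
-- ===== Notes on version B (the rewrite author's own statement) =====
-- stated objective: faster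
-- what changed: Replaces A's all-pairs character-by-character diff count with a dictionary keyed by (position, id with that position deleted): each id's one-character-off partners are found by hash lookup, removing the inner scan over all ids.
import Mathlib
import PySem

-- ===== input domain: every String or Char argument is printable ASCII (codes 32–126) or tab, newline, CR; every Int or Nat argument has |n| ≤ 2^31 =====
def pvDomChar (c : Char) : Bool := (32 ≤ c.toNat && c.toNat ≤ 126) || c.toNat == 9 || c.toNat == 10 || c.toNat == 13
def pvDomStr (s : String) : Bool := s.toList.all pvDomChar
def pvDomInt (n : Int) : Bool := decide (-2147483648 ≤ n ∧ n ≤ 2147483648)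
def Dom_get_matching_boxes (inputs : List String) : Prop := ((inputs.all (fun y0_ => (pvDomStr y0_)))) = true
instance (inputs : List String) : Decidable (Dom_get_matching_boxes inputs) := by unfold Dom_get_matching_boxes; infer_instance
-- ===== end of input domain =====

-- B replaces A's all-pairs character-count scan by a hash index keyed by
-- (position, id with that position deleted); equivalence of return values is proved
-- (A's write-only local dict `boxes` is never read and is omitted from the port).

-- ===== PORT A =====
-- inner loop `for i in range(0,len(a)): if a[i]!=b[i]: diff+=1`
def aDiffCount (a b : List Char) : Nat :=
  (List.range a.length).foldl (fun diff i => if a.getD i ' ' ≠ b.getD i ' ' then diff + 1 else diff) 0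

-- second loop `for i in range(...): if a[i]!=b[i]: return a[:i]+a[i+1:]`
-- (slice a[:i]+a[i+1:] with 0 ≤ i < len a is exactly take i ++ drop (i+1))
def aFindCommon (a b : List Char) (i : Nat) : Option (List Char) :=
  if _h : i < a.length then
    if a.getD i ' ' ≠ b.getD i ' ' then some (a.take i ++ a.drop (i + 1))
    else aFindCommon a b (i + 1)
  else none
termination_by a.length - i

-- `for box_id2 in inputs: …`
def aInner (a : List Char) : List String → Option String
  | [] => none
  | b2 :: rest =>
    if a.length = b2.toList.length then
      if aDiffCount a b2.toList = 1 then
        match aFindCommon a b2.toList 0 with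
        | some c => some (String.ofList c)
        | none => aInner a rest
      else aInner a rest
    else aInner a rest

-- `for box_id in inputs: …`
def aOuter (inputs : List String) : List String → Option String
  | [] => none
  | b :: rest =>
    match aInner b.toList inputs with
    | some c => some c
    | none => aOuter inputs rest

def get_matching_boxes (inputs : List String) : Option String := aOuter inputs inputs

-- ===== PORT B =====
-- s[:p] + s[p+1:]
def bRemoveAt (s : List Char) (p : Nat) : List Char := s.take p ++ s.drop (p + 1)

-- enumerate(inputs) (indices are nonnegative ints, kept as Nat)
def bEnum (k : Nat) : List String → List (Nat × String)
  | [] => []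
  | s :: t => (k, s) :: bEnum (k + 1) t

-- first pass: buckets.setdefault((p, s[:p]+s[p+1:]), []).append(idx)
def bBuckets (inputs : List String) : PySem.Dict (Nat × List Char) (List Nat) :=
  (bEnum 0 inputs).foldl (fun d is =>
    (List.range is.2.toList.length).foldl (fun d p =>
      d.insert (p, bRemoveAt is.2.toList p)
        (d.getD (p, bRemoveAt is.2.toList p) [] ++ [is.1])) d)
    PySem.Dict.empty

-- the comprehension building cands
def bCands (inputs : List String) (bk : PySem.Dict (Nat × List Char) (List Nat))
    (idx : Nat) (s : List Char) : List (Nat × Nat) :=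
  (List.range s.length).flatMap (fun p =>
    (bk.getD (p, bRemoveAt s p) []).filterMap (fun j =>
      if j ≠ idx ∧ (inputs.getD j "").toList ≠ s then some (j, p) else none))

-- min(cands): Python's min over int pairs (lexicographic), as a running-min fold
def bMin : List (Nat × Nat) → Option (Nat × Nat)
  | [] => none
  | x :: t => some (t.foldl (fun m y => if y.1 < m.1 ∨ (y.1 = m.1 ∧ y.2 < m.2) then y else m) x)

-- second pass: for idx, s in enumerate(inputs): …
def bOuter (inputs : List String) (bk : PySem.Dict (Nat × List Char) (List Nat)) :
    List (Nat × String) → Option String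
  | [] => none
  | is :: rest =>
    match bMin (bCands inputs bk is.1 is.2.toList) with
    | some jp => some (String.ofList (bRemoveAt is.2.toList jp.2))
    | none => bOuter inputs bk rest

def get_matching_boxes_alt (inputs : List String) : Option String :=
  bOuter inputs (bBuckets inputs) (bEnum 0 inputs)

-- ===== PRECONDITION & SPEC =====
def Spec_get_matching_boxes (inputs : List String) (out : Option String) : Prop := out = get_matching_boxes_alt inputs
instance (inputs : List String) (out : Option String) : Decidable (Spec_get_matching_boxes inputs out) := by unfold Spec_get_matching_boxes; infer_instance

-- ===== CLAIM (what is proved, stated in full; the proofs are below) =====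
def Claim_equal_get_matching_boxes : Prop := ∀ (inputs : List String), Dom_get_matching_boxes inputs → Spec_get_matching_boxes inputs (get_matching_boxes inputs)

-- ===== LEMMAS AND PROOFS =====

-- the pair predicate: s and t differ in exactly the single position p
def PairAt (s t : List Char) (p : Nat) : Prop :=
  p < s.length ∧ p < t.length ∧ bRemoveAt s p = bRemoveAt t p ∧ s ≠ t

-- A's per-candidate result, factored out of aInner
def elemA (a t : List Char) : Option String :=
  if a.length = t.length then
    if aDiffCount a t = 1 then (aFindCommon a t 0).map String.ofList else none
  else none

theorem length_bRemoveAt (s : List Char) (p : Nat) (h : p < s.length) :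
    (bRemoveAt s p).length = s.length - 1 := by
  simp [bRemoveAt]; omega

theorem getD_bRemoveAt (s : List Char) (p i : Nat) (h : p < s.length) :
    (bRemoveAt s p).getD i ' ' = if i < p then s.getD i ' ' else s.getD (i + 1) ' ' := by
  have htake : (s.take p).length = p := by simp; omega
  simp only [bRemoveAt, List.getD_eq_getElem?_getD, List.getElem?_append, htake,
    List.getElem?_take, List.getElem?_drop]
  split_ifs with h1
  · rfl
  · have : p + 1 + (i - p) = i + 1 := by omega
    rw [this]

theorem pairAt_length_eq {s t : List Char} {p : Nat} (h : PairAt s t p) : s.length = t.length := by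
  obtain ⟨hp, hq, he, -⟩ := h
  have := congrArg List.length he
  rw [length_bRemoveAt s p hp, length_bRemoveAt t p hq] at this
  omega

theorem ext_of_getD {s t : List Char} (hl : s.length = t.length)
    (h : ∀ i < s.length, s.getD i ' ' = t.getD i ' ') : s = t := by
  apply List.ext_getElem hl
  intro i h1 h2
  have := h i h1
  rwa [List.getD_eq_getElem s ' ' h1, List.getD_eq_getElem t ' ' h2] at this

theorem bRemoveAt_eq_iff {s t : List Char} {p : Nat} (hp : p < s.length) (hq : p < t.length)
    (hl : s.length = t.length) :
    bRemoveAt s p = bRemoveAt t p ↔ ∀ i < s.length, i ≠ p → s.getD i ' ' = t.getD i ' ' := by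
  constructor
  · intro he i hi hne
    rcases Nat.lt_or_ge i p with hip | hip
    · have h2 := congrArg (fun l => l.getD i ' ') he
      simp only [getD_bRemoveAt s p i hp, getD_bRemoveAt t p i hq, if_pos hip] at h2
      exact h2
    · have h2 := congrArg (fun l => l.getD (i - 1) ' ') he
      simp only [getD_bRemoveAt s p (i - 1) hp, getD_bRemoveAt t p (i - 1) hq] at h2
      have hni : ¬ (i - 1 < p) := by omega
      rw [if_neg hni, if_neg hni] at h2
      have h1 : i - 1 + 1 = i := by omega
      rwa [h1] at h2
  · intro h
    apply ext_of_getD (by rw [length_bRemoveAt s p hp, length_bRemoveAt t p hq, hl])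
    intro i hi
    rw [length_bRemoveAt s p hp] at hi
    rw [getD_bRemoveAt s p i hp, getD_bRemoveAt t p i hq]
    split_ifs with h1
    · exact h i (by omega) (by omega)
    · exact h (i + 1) (by omega) (by omega)

theorem pairAt_diff_at {s t : List Char} {p : Nat} (h : PairAt s t p) :
    s.getD p ' ' ≠ t.getD p ' ' := by
  obtain ⟨hp, hq, he, hne⟩ := h
  have hl : s.length = t.length := pairAt_length_eq ⟨hp, hq, he, hne⟩
  intro hpp
  apply hne
  apply ext_of_getD hl
  intro i hi
  by_cases hip : i = p
  · subst hip; exact hpp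
  · exact ((bRemoveAt_eq_iff hp hq hl).mp he) i hi hip

theorem foldl_count {α : Type} (f : α → Bool) :
    ∀ (l : List α) (acc : Nat),
      l.foldl (fun d i => if f i then d + 1 else d) acc = acc + l.countP f := by
  intro l
  induction l with
  | nil => simp
  | cons x xs ih =>
    intro acc
    by_cases hx : f x <;> simp [hx, ih] <;> omega

theorem aDiffCount_eq_countP (a b : List Char) :
    aDiffCount a b = (List.range a.length).countP (fun i => a.getD i ' ' != b.getD i ' ') := by
  unfold aDiffCount
  have h := foldl_count (fun i => a.getD i ' ' != b.getD i ' ') (List.range a.length) 0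
  simp only [Nat.zero_add] at h
  rw [← h]
  congr 1
  funext d i
  by_cases hx : a.getD i ' ' = b.getD i ' '
  · simp
  · simp

theorem aDiffCount_eq_one_iff {a t : List Char} (hl : a.length = t.length) :
    aDiffCount a t = 1 ↔ ∃ p, PairAt a t p := by
  rw [aDiffCount_eq_countP]
  constructor
  · intro h1
    rw [List.countP_eq_length_filter] at h1
    obtain ⟨p, hp⟩ := List.length_eq_one_iff.mp h1
    have hpmem : p ∈ (List.range a.length).filter (fun i => a.getD i ' ' != t.getD i ' ') := by
      rw [hp]; exact List.mem_singleton.mpr rfl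
    rw [List.mem_filter, List.mem_range] at hpmem
    obtain ⟨hplt, hpdiff⟩ := hpmem
    have honly : ∀ i < a.length, i ≠ p → a.getD i ' ' = t.getD i ' ' := by
      intro i hi hne
      by_contra hd
      have : i ∈ (List.range a.length).filter (fun j => a.getD j ' ' != t.getD j ' ') := by
        rw [List.mem_filter, List.mem_range]
        exact ⟨hi, by simpa using hd⟩
      rw [hp, List.mem_singleton] at this
      exact hne this
    refine ⟨p, hplt, by omega, ?_, ?_⟩
    · exact (bRemoveAt_eq_iff hplt (by omega) hl).mpr honly
    · intro he
      subst he
      simp at hpdiff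
  · rintro ⟨p, hpair⟩
    have hplt := hpair.1
    have hdiff := pairAt_diff_at hpair
    have honly := (bRemoveAt_eq_iff hpair.1 hpair.2.1 hl).mp hpair.2.2.1
    have hcong : ∀ i ∈ List.range a.length,
        ((fun j => a.getD j ' ' != t.getD j ' ') i = true ↔ (fun j => j == p) i = true) := by
      intro i hi
      rw [List.mem_range] at hi
      by_cases hip : i = p
      · subst hip
        simp only [bne_iff_ne, ne_eq, beq_self_eq_true, iff_true]
        exact hdiff
      · simp only [bne_iff_ne, ne_eq, beq_iff_eq]
        exact ⟨fun hd => (hd (honly i hi hip)).elim, fun h => (hip h).elim⟩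
    rw [List.countP_congr hcong, ← List.count_eq_countP]
    exact List.count_eq_one_of_mem (List.nodup_range) (List.mem_range.mpr hplt)

theorem aFindCommon_reach {a t : List Char} {p : Nat}
    (hplt : p < a.length) (hdiff : a.getD p ' ' ≠ t.getD p ' ')
    (hbelow : ∀ i < a.length, i ≠ p → a.getD i ' ' = t.getD i ' ') :
    ∀ (k i : Nat), i ≤ p → p - i = k → aFindCommon a t i = some (bRemoveAt a p) := by
  intro k
  induction k with
  | zero =>
    intro i hile hk
    have : i = p := by omega
    subst this
    rw [aFindCommon, dif_pos hplt, if_pos hdiff]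
    rfl
  | succ k ih =>
    intro i hile hk
    have hlt : i < p := by omega
    have heq : a.getD i ' ' = t.getD i ' ' := hbelow i (by omega) (by omega)
    rw [aFindCommon, dif_pos (by omega : i < a.length), if_neg (by simpa using heq)]
    exact ih (i + 1) (by omega) (by omega)

theorem aFindCommon_eq {a t : List Char} {p : Nat} (h : PairAt a t p) (hl : a.length = t.length) :
    aFindCommon a t 0 = some (bRemoveAt a p) :=
  aFindCommon_reach h.1 (pairAt_diff_at h)
    ((bRemoveAt_eq_iff h.1 h.2.1 hl).mp h.2.2.1) p 0 (Nat.zero_le p) rfl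

theorem elemA_eq_some_of_pairAt {a t : List Char} {p : Nat} (h : PairAt a t p) :
    elemA a t = some (String.ofList (bRemoveAt a p)) := by
  have hl : a.length = t.length := pairAt_length_eq h
  unfold elemA
  rw [if_pos hl, if_pos ((aDiffCount_eq_one_iff hl).mpr ⟨p, h⟩), aFindCommon_eq h hl]
  rfl

theorem elemA_eq_some_iff {a t : List Char} {c : String} :
    elemA a t = some c ↔ ∃ p, PairAt a t p ∧ c = String.ofList (bRemoveAt a p) := by
  constructor
  · intro h
    unfold elemA at h
    split_ifs at h with hl hc
    obtain ⟨p, hp⟩ := (aDiffCount_eq_one_iff hl).mp hc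
    rw [aFindCommon_eq hp hl] at h
    exact ⟨p, hp, by simpa using h.symm⟩
  · rintro ⟨p, hp, rfl⟩
    exact elemA_eq_some_of_pairAt hp

theorem elemA_eq_none_iff {a t : List Char} :
    elemA a t = none ↔ ¬ ∃ p, PairAt a t p := by
  constructor
  · rintro h ⟨p, hp⟩
    rw [elemA_eq_some_of_pairAt hp] at h
    simp at h
  · intro h
    cases hc : elemA a t with
    | none => rfl
    | some c =>
      obtain ⟨p, hp, -⟩ := elemA_eq_some_iff.mp hc
      exact (h ⟨p, hp⟩).elim

theorem aInner_eq_findSome (a : List Char) (l : List String) :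
    aInner a l = l.findSome? (fun b => elemA a b.toList) := by
  induction l with
  | nil => rfl
  | cons b rest ih =>
    rw [aInner, List.findSome?]
    cases hel : elemA a b.toList with
    | some c =>
      unfold elemA at hel
      split_ifs at hel with hl hc
      rw [if_pos hl, if_pos hc]
      cases hfc : aFindCommon a b.toList 0 with
      | none => rw [hfc] at hel; simp at hel
      | some x => rw [hfc] at hel; simpa using hel
    | none =>
      unfold elemA at hel
      split_ifs at hel with hl hc
      · rw [if_pos hl, if_pos hc]
        cases hfc : aFindCommon a b.toList 0 with
        | some x => rw [hfc] at hel; simp at hel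
        | none => simpa using ih
      · rw [if_pos hl, if_neg hc]; exact ih
      · rw [if_neg hl]; exact ih

theorem mem_bEnum {k : Nat} {l : List String} {i : Nat} {s : String} :
    (i, s) ∈ bEnum k l ↔ ∃ m, m < l.length ∧ i = k + m ∧ s = l.getD m "" := by
  induction l generalizing k with
  | nil => simp [bEnum]
  | cons b rest ih =>
    rw [bEnum]
    simp only [List.mem_cons, Prod.mk.injEq, ih]
    constructor
    · rintro (⟨rfl, rfl⟩ | ⟨m, hm, rfl, rfl⟩)
      · exact ⟨0, by simp, by omega, by simp⟩
      · exact ⟨m + 1, by simp; omega, by omega, by simp⟩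
    · rintro ⟨m, hm, rfl, rfl⟩
      cases m with
      | zero => left; simp
      | succ m => right; exact ⟨m, by simp at hm; omega, by omega, by simp⟩

theorem bBuckets_inner_getD (s : List Char) (i : Nat) (p : Nat) (k : List Char) :
    ∀ (n : Nat) (d : PySem.Dict (Nat × List Char) (List Nat)),
    (((List.range n).foldl (fun d q =>
        d.insert (q, bRemoveAt s q) (d.getD (q, bRemoveAt s q) [] ++ [i])) d)).getD (p, k) []
      = d.getD (p, k) [] ++ (if p < n ∧ bRemoveAt s p = k then [i] else []) := by
  intro n
  induction n with
  | zero => intro d; simp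
  | succ n ih =>
    intro d
    rw [List.range_succ, List.foldl_append, List.foldl_cons, List.foldl_nil,
      PySem.Dict.getD_insert]
    by_cases hk : ((p, k) : Nat × List Char) = (n, bRemoveAt s n)
    · have hp : p = n := by rw [Prod.mk.injEq] at hk; exact hk.1
      have hkk : k = bRemoveAt s n := by rw [Prod.mk.injEq] at hk; exact hk.2
      subst hp
      subst hkk
      have h1 : ¬ (p < p ∧ bRemoveAt s p = bRemoveAt s p) := by simp
      rw [if_pos rfl, ih, if_neg h1, if_pos ⟨by omega, rfl⟩]
      simp
    · rw [if_neg hk, ih]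
      by_cases hc : p < n ∧ bRemoveAt s p = k
      · rw [if_pos hc, if_pos ⟨by omega, hc.2⟩]
      · have h2 : ¬ (p < n + 1 ∧ bRemoveAt s p = k) := by
          rintro ⟨h3, h4⟩
          rcases Nat.lt_or_ge p n with h5 | h5
          · exact hc ⟨h5, h4⟩
          · have h6 : p = n := by omega
            subst h6
            exact hk (by rw [h4])
        rw [if_neg hc, if_neg h2]

theorem bBuckets_outer_getD (p : Nat) (k : List Char) :
    ∀ (el : List (Nat × String)) (d : PySem.Dict (Nat × List Char) (List Nat)),
    ((el.foldl (fun d is =>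
        (List.range is.2.toList.length).foldl (fun d q =>
          d.insert (q, bRemoveAt is.2.toList q)
            (d.getD (q, bRemoveAt is.2.toList q) [] ++ [is.1])) d) d)).getD (p, k) []
      = d.getD (p, k) [] ++ el.flatMap (fun is =>
          if p < is.2.toList.length ∧ bRemoveAt is.2.toList p = k then [is.1] else []) := by
  intro el
  induction el with
  | nil => intro d; simp
  | cons is rest ih =>
    intro d
    rw [List.foldl_cons, ih, bBuckets_inner_getD, List.flatMap_cons, List.append_assoc]

theorem bBuckets_getD (inputs : List String) (p : Nat) (k : List Char) :
    (bBuckets inputs).getD (p, k) []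
      = (bEnum 0 inputs).flatMap (fun is =>
          if p < is.2.toList.length ∧ bRemoveAt is.2.toList p = k then [is.1] else []) := by
  unfold bBuckets
  rw [bBuckets_outer_getD]
  simp

theorem mem_bCands {inputs : List String} {idx : Nat} {s : List Char} {j p : Nat}
    (hidx : (inputs.getD idx "").toList = s) :
    (j, p) ∈ bCands inputs (bBuckets inputs) idx s ↔
      j < inputs.length ∧ PairAt s (inputs.getD j "").toList p := by
  unfold bCands
  rw [List.mem_flatMap]
  constructor
  · rintro ⟨q, hq, hmem⟩
    rw [List.mem_range] at hq
    rw [List.mem_filterMap] at hmem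
    obtain ⟨j', hj', hout⟩ := hmem
    split_ifs at hout with hcond
    rw [Option.some.injEq, Prod.mk.injEq] at hout
    obtain ⟨rfl, rfl⟩ := hout
    rw [bBuckets_getD, List.mem_flatMap] at hj'
    obtain ⟨is, hisel, hjmem⟩ := hj'
    rcases Decidable.em (q < is.2.toList.length ∧ bRemoveAt is.2.toList q = bRemoveAt s q) with hbk | hbk
    swap
    · rw [if_neg hbk] at hjmem; simp at hjmem
    rw [if_pos hbk, List.mem_singleton] at hjmem
    subst hjmem
    obtain ⟨m, hmlt, him, hs⟩ := mem_bEnum.mp (show (is.1, is.2) ∈ bEnum 0 inputs from hisel)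
    have hjn : is.1 < inputs.length := by omega
    have ht : (inputs.getD is.1 "").toList = is.2.toList := by
      have him' : is.1 = m := by omega
      rw [him', ← hs]
    refine ⟨hjn, hq, ?_, ?_, ?_⟩
    · rw [ht]; exact hbk.1
    · rw [ht]; exact hbk.2.symm
    · exact fun he => hcond.2 he.symm
  · rintro ⟨hjn, hpair⟩
    obtain ⟨hps, hpt, hrm, hne⟩ := hpair
    refine ⟨p, List.mem_range.mpr hps, ?_⟩
    rw [List.mem_filterMap]
    refine ⟨j, ?_, ?_⟩
    · rw [bBuckets_getD, List.mem_flatMap]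
      refine ⟨(j, inputs.getD j ""), ?_, ?_⟩
      · exact mem_bEnum.mpr ⟨j, hjn, by omega, rfl⟩
      · rw [if_pos ⟨hpt, hrm.symm⟩]
        exact List.mem_singleton.mpr rfl
    · have hnes : (inputs.getD j "").toList ≠ s := fun he => hne (by rw [he])
      have hjidx : j ≠ idx := fun he => hnes (by rw [he, hidx])
      rw [if_pos ⟨hjidx, hnes⟩]

-- lexicographic min characterization
theorem bMin_fold_spec :
    ∀ (t : List (Nat × Nat)) (x : Nat × Nat),
      (t.foldl (fun m y => if y.1 < m.1 ∨ (y.1 = m.1 ∧ y.2 < m.2) then y else m) x) ∈ x :: t ∧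
      ∀ y ∈ x :: t,
        (t.foldl (fun m y => if y.1 < m.1 ∨ (y.1 = m.1 ∧ y.2 < m.2) then y else m) x).1 < y.1 ∨
        ((t.foldl (fun m y => if y.1 < m.1 ∨ (y.1 = m.1 ∧ y.2 < m.2) then y else m) x).1 = y.1 ∧
         (t.foldl (fun m y => if y.1 < m.1 ∨ (y.1 = m.1 ∧ y.2 < m.2) then y else m) x).2 ≤ y.2) := by
  intro t
  induction t with
  | nil =>
    intro x
    refine ⟨List.mem_singleton.mpr rfl, ?_⟩
    intro y hy
    rw [List.mem_singleton] at hy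
    subst hy
    simp only [List.foldl_nil]
    exact Or.inr ⟨trivial, le_refl _⟩
  | cons z t ih =>
    intro x
    rw [List.foldl_cons]
    set x' := if z.1 < x.1 ∨ (z.1 = x.1 ∧ z.2 < x.2) then z else x with hx'def
    have hcase : x' = z ∨ x' = x := by rw [hx'def]; split_ifs <;> simp
    have hlez : x'.1 < z.1 ∨ (x'.1 = z.1 ∧ x'.2 ≤ z.2) := by
      rw [hx'def]; split_ifs with h <;> omega
    have hlex : x'.1 < x.1 ∨ (x'.1 = x.1 ∧ x'.2 ≤ x.2) := by
      rw [hx'def]; split_ifs with h <;> omega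
    obtain ⟨hmem, hall⟩ := ih x'
    have hFx' := hall x' (List.mem_cons_self ..)
    constructor
    · rcases List.mem_cons.mp hmem with h1 | h1
      · rw [h1]
        rcases hcase with h2 | h2 <;> rw [h2] <;> simp
      · exact List.mem_cons_of_mem _ (List.mem_cons_of_mem _ h1)
    · intro y hy
      rcases List.mem_cons.mp hy with rfl | hy1
      · omega
      · rcases List.mem_cons.mp hy1 with rfl | hy2
        · omega
        · exact hall y (List.mem_cons_of_mem _ hy2)

theorem bMin_spec {l : List (Nat × Nat)} {m : Nat × Nat} (h : bMin l = some m) :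
    m ∈ l ∧ ∀ y ∈ l, m.1 < y.1 ∨ (m.1 = y.1 ∧ m.2 ≤ y.2) := by
  cases l with
  | nil => simp [bMin] at h
  | cons x t =>
    rw [bMin, Option.some.injEq] at h
    subst h
    exact bMin_fold_spec t x

theorem bMin_eq_none_iff {l : List (Nat × Nat)} : bMin l = none ↔ l = [] := by
  cases l <;> simp [bMin]

theorem findSome?_eq_some_iff_first {α β : Type} (l : List α) (f : α → Option β) (c : β) :
    l.findSome? f = some c ↔
      ∃ j, ∃ _ : j < l.length, f l[j] = some c ∧ ∀ i, (hi : i < l.length) → i < j → f l[i] = none := by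
  induction l with
  | nil => simp
  | cons a l ih =>
    rw [List.findSome?]
    cases ha : f a with
    | some b =>
      simp only []
      constructor
      · intro h
        rw [Option.some.injEq] at h
        subst h
        exact ⟨0, by simp, by simpa using ha, by omega⟩
      · rintro ⟨j, hj, hfj, hbelow⟩
        cases j with
        | zero => simp only [List.getElem_cons_zero] at hfj; rw [← hfj, ha]
        | succ j =>
          have := hbelow 0 (by simp) (by omega)
          simp only [List.getElem_cons_zero] at this
          rw [this] at ha
          cases ha
    | none =>
      simp only []
      rw [ih]
      constructor
      · rintro ⟨j, hj, hfj, hbelow⟩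
        refine ⟨j + 1, by simpa using hj, by simpa using hfj, ?_⟩
        intro i hi hij
        cases i with
        | zero => simpa using ha
        | succ i =>
          have := hbelow i (by simpa using hi) (by omega)
          simpa using this
      · rintro ⟨j, hj, hfj, hbelow⟩
        cases j with
        | zero =>
          simp only [List.getElem_cons_zero] at hfj
          rw [hfj] at ha
          cases ha
        | succ j =>
          refine ⟨j, by simpa using hj, by simpa using hfj, ?_⟩
          intro i hi hij
          have := hbelow (i + 1) (by simpa using hi) (by omega)
          simpa using this

-- the per-element equality: B's bucket lookup + min equals A's inner scan at index idx
theorem elem_eq (inputs : List String) (idx : Nat) (s : String)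
    (hidx : inputs.getD idx "" = s) :
    (match bMin (bCands inputs (bBuckets inputs) idx s.toList) with
     | some jp => some (String.ofList (bRemoveAt s.toList jp.2))
     | none => (none : Option String))
      = aInner s.toList inputs := by
  have hidx' : (inputs.getD idx "").toList = s.toList := by rw [hidx]
  rw [aInner_eq_findSome]
  cases hb : bMin (bCands inputs (bBuckets inputs) idx s.toList) with
  | none =>
    rw [bMin_eq_none_iff] at hb
    have hnone : ∀ b ∈ inputs, elemA s.toList b.toList = none := by
      intro b hbmem
      rw [elemA_eq_none_iff]
      rintro ⟨p, hp⟩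
      obtain ⟨j, hj, rfl⟩ := List.getElem_of_mem hbmem
      have hgd : inputs.getD j "" = inputs[j] := List.getD_eq_getElem _ _ hj
      have hmem : (j, p) ∈ bCands inputs (bBuckets inputs) idx s.toList :=
        (mem_bCands hidx').mpr ⟨hj, by rw [hgd]; exact hp⟩
      rw [hb] at hmem
      simp at hmem
    exact (List.findSome?_eq_none_iff.mpr hnone).symm
  | some jp =>
    obtain ⟨j, p⟩ := jp
    obtain ⟨hmem, hmin⟩ := bMin_spec hb
    obtain ⟨hjn, hpair⟩ := (mem_bCands hidx').mp hmem
    symm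
    rw [findSome?_eq_some_iff_first]
    refine ⟨j, hjn, ?_, ?_⟩
    · rw [show inputs[j] = inputs.getD j "" from (List.getD_eq_getElem _ _ hjn).symm]
      exact elemA_eq_some_of_pairAt hpair
    · intro i hi hij
      rw [elemA_eq_none_iff]
      rintro ⟨q, hq⟩
      have hgd : inputs.getD i "" = inputs[i] := List.getD_eq_getElem _ _ hi
      have hm : (i, q) ∈ bCands inputs (bBuckets inputs) idx s.toList :=
        (mem_bCands hidx').mpr ⟨hi, by rw [hgd]; exact hq⟩
      have hle := hmin (i, q) hm
      simp only at hle
      omega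

theorem outer_eq (inputs : List String) :
    ∀ (k : Nat) (l : List String), (∀ m < l.length, inputs.getD (k + m) "" = l.getD m "") →
    bOuter inputs (bBuckets inputs) (bEnum k l) = aOuter inputs l := by
  intro k l
  induction l generalizing k with
  | nil => intro _; rfl
  | cons b rest ih =>
    intro h
    have h0 : inputs.getD k "" = b := by
      have := h 0 (by simp)
      simpa using this
    have he := elem_eq inputs k b h0
    rw [bEnum]
    show (match bMin (bCands inputs (bBuckets inputs) k b.toList) with
      | some jp => some (String.ofList (bRemoveAt b.toList jp.2))
      | none => bOuter inputs (bBuckets inputs) (bEnum (k + 1) rest))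
      = aOuter inputs (b :: rest)
    rw [aOuter, ← he]
    cases hbm : bMin (bCands inputs (bBuckets inputs) k b.toList) with
    | some jp => rfl
    | none =>
      show bOuter inputs (bBuckets inputs) (bEnum (k + 1) rest) = aOuter inputs rest
      apply ih
      intro m hm
      have := h (m + 1) (by simp; omega)
      have harith : k + (m + 1) = k + 1 + m := by omega
      rw [harith] at this
      simpa using this

-- ===== VERDICT (by name: the statement is the Claim_ definition above) =====
theorem get_matching_boxes_spec : Claim_equal_get_matching_boxes := by
  intro inputs _
  unfold Spec_get_matching_boxes get_matching_boxes get_matching_boxes_alt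
  exact (outer_eq inputs 0 inputs (by simp)).symm
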